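-- pv_equiv track=rewrite | github.com/EWRK0303/Formal-Languages | data/gen_dyck.py | is_valid_rdyck
-- ===== SOURCE A (Python) =====
-- def is_valid_rdyck(string: str) -> bool:
--     """
--     Check if string is valid reset Dyck
--
--     Args:
--         string: string to check
--
--     Returns:
--         True if valid reset Dyck, False otherwise
--     """
--     stack = []
--
--     for char in string:
--         if char == '(':  # opening bracket
--             stack.append(char)
--         elif char == ')':  # closing bracket
--             if not stack:
--                 return False
--             stack.pop()
--         elif char == '1':  # reset symbol
--             stack.clear()  # clear stack
--
--     return True  # Reset Dyck allows any sequence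
-- ===== SOURCE B (Python) =====
-- def is_valid_rdyck(string: str) -> bool:
--     """Reset-Dyck check: split on the reset symbol and balance-count each segment."""
--     for segment in string.split('1'):
--         balance = 0
--         for char in segment:
--             if char == '(':
--                 balance += 1
--             elif char == ')':
--                 balance -= 1
--                 if balance < 0:
--                     return False
--     return True
-- ===== Notes on version B (the rewrite author's own statement) =====
-- stated objective: alternative
-- what changed: B splits the input on the reset symbol '1' and checks each segment independently with an integer balance counter, instead of A's single scan that simulates a stack and clears it on reset.
import Mathlib
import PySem

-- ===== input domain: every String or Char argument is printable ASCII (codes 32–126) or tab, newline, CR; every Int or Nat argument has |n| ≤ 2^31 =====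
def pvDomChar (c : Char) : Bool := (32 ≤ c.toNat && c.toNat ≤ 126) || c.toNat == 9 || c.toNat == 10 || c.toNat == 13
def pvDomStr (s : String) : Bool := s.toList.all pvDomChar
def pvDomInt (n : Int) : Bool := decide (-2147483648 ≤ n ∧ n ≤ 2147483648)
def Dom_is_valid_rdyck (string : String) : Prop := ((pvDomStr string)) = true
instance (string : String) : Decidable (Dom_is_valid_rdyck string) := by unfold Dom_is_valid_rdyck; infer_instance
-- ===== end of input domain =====

-- B checks segments obtained by splitting on the reset symbol '1' with an integer
-- balance counter, instead of A's single stack-simulating scan (alternative decomposition).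

-- ===== PORT A =====
-- A's loop: stack of chars, push on '(', pop on ')' (False if empty), clear on '1'.
def pvGoA : List Char → List Char → Bool
  | [], _ => true
  | c :: rest, stack =>
    if c = '(' then pvGoA rest (stack ++ ['('])
    else if c = ')' then
      if stack = [] then false else pvGoA rest stack.dropLast
    else if c = '1' then pvGoA rest []
    else pvGoA rest stack

def is_valid_rdyck (string : String) : Bool := pvGoA string.toList []

-- ===== PORT B =====
-- Source B's inner loop: balance counter over one segment, fail when it would go negative.
def pvCheckSeg : List Char → Int → Bool
  | [], _ => true
  | c :: rest, bal =>
    if c = '(' then pvCheckSeg rest (bal + 1)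
    else if c = ')' then
      if bal - 1 < 0 then false else pvCheckSeg rest (bal - 1)
    else pvCheckSeg rest bal

def is_valid_rdyck_alt (string : String) : Bool :=
  (PySem.Chars.splitOn string.toList ['1']).all (fun seg => pvCheckSeg seg 0)

-- ===== PRECONDITION & SPEC =====
def Spec_is_valid_rdyck (string : String) (out : Bool) : Prop := out = is_valid_rdyck_alt string
instance (string : String) (out : Bool) : Decidable (Spec_is_valid_rdyck string out) := by unfold Spec_is_valid_rdyck; infer_instance

-- ===== CLAIM (what is proved, stated in full; the proofs are below) =====
def Claim_equal_is_valid_rdyck : Prop := ∀ (string : String), Dom_is_valid_rdyck string → Spec_is_valid_rdyck string (is_valid_rdyck string)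

-- ===== LEMMAS AND PROOFS =====

-- structural reference version of split on '1'
def pvSplit1 : List Char → List (List Char)
  | [] => [[]]
  | c :: cs => if c = '1' then [] :: pvSplit1 cs else (pvSplit1 cs).modifyHead (c :: ·)

theorem pvSplit1_ne_nil (cs : List Char) : pvSplit1 cs ≠ [] := by
  cases cs with
  | nil => simp [pvSplit1]
  | cons c cs =>
    simp only [pvSplit1]
    split_ifs
    · simp
    · cases h : pvSplit1 cs with
      | nil => exact absurd h (pvSplit1_ne_nil cs)
      | cons a l => simp [List.modifyHead]

theorem pv_go_eq (fuel : Nat) : ∀ (l cur : List Char) (acc : List (List Char)),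
    l.length ≤ fuel →
    PySem.Chars.splitOn.go ['1'] fuel l cur acc =
      acc.reverse ++ (cur.reverse ++ (pvSplit1 l).headI) :: (pvSplit1 l).tail := by
  induction fuel with
  | zero =>
    intro l cur acc h
    have : l = [] := List.length_eq_zero_iff.mp (Nat.le_zero.mp h)
    subst this
    simp [PySem.Chars.splitOn.go, pvSplit1]
  | succ fuel ih =>
    intro l cur acc h
    cases l with
    | nil => simp [PySem.Chars.splitOn.go, pvSplit1]
    | cons c rest =>
      have hrest : rest.length ≤ fuel := by simpa using h
      by_cases hc : c = '1'
      · subst hc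
        rw [show PySem.Chars.splitOn.go ['1'] (fuel + 1) ('1' :: rest) cur acc =
            PySem.Chars.splitOn.go ['1'] fuel rest [] (cur.reverse :: acc) by
          simp [PySem.Chars.splitOn.go, List.isPrefixOf]]
        rw [ih rest [] (cur.reverse :: acc) hrest]
        have hne := pvSplit1_ne_nil rest
        cases hS : pvSplit1 rest with
        | nil => exact absurd hS hne
        | cons a t => simp [pvSplit1, hS]
      · rw [show PySem.Chars.splitOn.go ['1'] (fuel + 1) (c :: rest) cur acc =
            PySem.Chars.splitOn.go ['1'] fuel rest (c :: cur) acc by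
          simp [PySem.Chars.splitOn.go, List.isPrefixOf, Ne.symm hc]]
        rw [ih rest (c :: cur) acc hrest]
        have hne := pvSplit1_ne_nil rest
        cases hS : pvSplit1 rest with
        | nil => exact absurd hS hne
        | cons a t => simp [pvSplit1, hS, hc, List.modifyHead]

theorem pvSplitOn_eq (cs : List Char) : PySem.Chars.splitOn cs ['1'] = pvSplit1 cs := by
  unfold PySem.Chars.splitOn
  rw [pv_go_eq (cs.length + 1) cs [] [] (Nat.le_succ _)]
  have hne := pvSplit1_ne_nil cs
  cases hS : pvSplit1 cs with
  | nil => exact absurd hS hne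
  | cons a t => simp

theorem pv_main (cs : List Char) : ∀ (stack : List Char),
    pvGoA cs stack =
      (pvCheckSeg (pvSplit1 cs).headI (stack.length : Int) &&
        (pvSplit1 cs).tail.all (fun seg => pvCheckSeg seg 0)) := by
  induction cs with
  | nil => intro stack; simp [pvGoA, pvSplit1, pvCheckSeg]
  | cons c rest ih =>
    intro stack
    by_cases h1 : c = '('
    · subst h1
      have hne := pvSplit1_ne_nil rest
      cases hS : pvSplit1 rest with
      | nil => exact absurd hS hne
      | cons a t =>
        simp only [pvGoA, ih, hS]
        simp [pvSplit1, hS, List.modifyHead, pvCheckSeg]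
    · by_cases h2 : c = ')'
      · subst h2
        have hne := pvSplit1_ne_nil rest
        cases hS : pvSplit1 rest with
        | nil => exact absurd hS hne
        | cons a t =>
          simp only [pvGoA, reduceIte, ih, hS]
          by_cases hs : stack = []
          · subst hs
            simp [pvSplit1, hS, List.modifyHead, pvCheckSeg]
          · have hlen : stack.length ≠ 0 := by simpa using hs
            have hlt : ¬ ((stack.length : Int) - 1 < 0) := by omega
            have hdl : ((stack.length - 1 : Nat) : Int) = (stack.length : Int) - 1 := by
              omega
            simp [pvSplit1, hS, List.modifyHead, pvCheckSeg, hs, hlt, hdl]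
      · by_cases h3 : c = '1'
        · subst h3
          have hne := pvSplit1_ne_nil rest
          cases hS : pvSplit1 rest with
          | nil => exact absurd hS hne
          | cons a t =>
            simp only [pvGoA, reduceIte, ih, hS]
            simp [pvSplit1, hS, pvCheckSeg, List.all_cons]
        · have hne := pvSplit1_ne_nil rest
          cases hS : pvSplit1 rest with
          | nil => exact absurd hS hne
          | cons a t =>
            simp only [pvGoA, h1, h2, h3, ih, hS]
            simp [pvSplit1, hS, h1, h2, h3, List.modifyHead, pvCheckSeg]

-- ===== VERDICT (by name: the statement is the Claim_ definition above) =====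
theorem is_valid_rdyck_spec : Claim_equal_is_valid_rdyck := by
  intro s _
  unfold Spec_is_valid_rdyck is_valid_rdyck is_valid_rdyck_alt
  rw [pvSplitOn_eq, pv_main]
  have hne := pvSplit1_ne_nil s.toList
  cases hS : pvSplit1 s.toList with
  | nil => exact absurd hS hne
  | cons a t => simp
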